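-- pv_equiv track=rewrite | github.com/CodeJayFlick/DANGER-Repository | cleaning_attempt_6/11627.java_741.py | evaluate_binary
-- ===== SOURCE A (Python) =====
-- def evaluate_binary(sizeout, sizein, in1, in2):
--     if sizein <= 0:
--         return 0
--     else:
--         mask = (1 << sizein) - 1
--         in1 &= mask
--         in2 &= mask
--         if in1 == in2:
--             return 1
--         elif sizein < 8:
--             return int(in1 < in2)
--         else:
--             bit_mask = 0x80
--             for _ in range(sizein - 1):
--                 bit_mask <<= 8
--             bit1 = (in1 & bit_mask) != 0
--             bit2 = (in2 & bit_mask) != 0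
--             if bit1 != bit2:
--                 return int(bit1)
--             else:
--                 return int(in1 < in2)
-- ===== SOURCE B (Python) =====
-- def evaluate_binary(sizeout, sizein, in1, in2):
--     # The sign-bit branch in the original is dead code: the tested bit lies
--     # above the sizein-bit mask, so the result is just a masked <= comparison.
--     if sizein <= 0:
--         return 0
--     mask = (1 << sizein) - 1
--     return int((in1 & mask) <= (in2 & mask))
-- ===== Notes on version B (the rewrite author's own statement) =====
-- stated objective: simpler
-- what changed: Replaces A's equality/width/sign-bit branch cascade and its O(sizein) bit_mask shifting loop (whose tested bit lies above the sizein-bit mask and is provably always zero) with a single branchless masked comparison int((in1 & mask) <= (in2 & mask)).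
import Mathlib
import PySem

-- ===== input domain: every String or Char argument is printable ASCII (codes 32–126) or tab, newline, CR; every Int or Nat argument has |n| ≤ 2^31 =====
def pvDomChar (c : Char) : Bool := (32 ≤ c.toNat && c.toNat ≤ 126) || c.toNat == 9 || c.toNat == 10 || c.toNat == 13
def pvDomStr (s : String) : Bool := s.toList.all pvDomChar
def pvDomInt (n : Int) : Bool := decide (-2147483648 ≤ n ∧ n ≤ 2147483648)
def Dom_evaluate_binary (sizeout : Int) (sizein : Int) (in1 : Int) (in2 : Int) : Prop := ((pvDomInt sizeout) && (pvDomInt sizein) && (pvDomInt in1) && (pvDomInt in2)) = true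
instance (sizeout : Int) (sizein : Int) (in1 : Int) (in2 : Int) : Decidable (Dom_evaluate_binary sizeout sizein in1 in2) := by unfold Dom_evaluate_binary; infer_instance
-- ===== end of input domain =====

-- B replaces A's equality/width/sign-bit branch cascade and its bit_mask shifting
-- loop (whose tested bit lies above the sizein-bit mask, hence is always zero)
-- with a single masked comparison; objective: simpler.

-- ===== PORT A =====
def evaluate_binary (sizeout : Int) (sizein : Int) (in1 : Int) (in2 : Int) : Int :=
  if sizein ≤ 0 then 0
  else
    let mask : Int := ((1 : Int) <<< sizein.toNat) - 1
    let in1' : Int := PySem.Int.band in1 mask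
    let in2' : Int := PySem.Int.band in2 mask
    if in1' = in2' then 1
    else if sizein < 8 then (if in1' < in2' then 1 else 0)
    else
      let bit_mask : Int :=
        (PySem.List.pyRange 0 (sizein - 1) 1).foldl (fun (b : Int) _ => b <<< (8 : Nat)) 128
      let bit1 : Bool := PySem.Int.band in1' bit_mask != 0
      let bit2 : Bool := PySem.Int.band in2' bit_mask != 0
      if bit1 != bit2 then (if bit1 then 1 else 0)
      else (if in1' < in2' then 1 else 0)

-- ===== PORT B =====
def evaluate_binary_alt (sizeout : Int) (sizein : Int) (in1 : Int) (in2 : Int) : Int :=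
  if sizein ≤ 0 then 0
  else
    let mask : Int := ((1 : Int) <<< sizein.toNat) - 1
    if PySem.Int.band in1 mask ≤ PySem.Int.band in2 mask then 1 else 0

-- ===== PRECONDITION & SPEC =====
def Spec_evaluate_binary (sizeout : Int) (sizein : Int) (in1 : Int) (in2 : Int) (out : Int) : Prop := out = evaluate_binary_alt sizeout sizein in1 in2
instance (sizeout : Int) (sizein : Int) (in1 : Int) (in2 : Int) (out : Int) : Decidable (Spec_evaluate_binary sizeout sizein in1 in2 out) := by unfold Spec_evaluate_binary; infer_instance

-- ===== CLAIM (what is proved, stated in full; the proofs are below) =====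
def Claim_equal_evaluate_binary : Prop := ∀ (sizeout : Int) (sizein : Int) (in1 : Int) (in2 : Int), Dom_evaluate_binary sizeout sizein in1 in2 → Spec_evaluate_binary sizeout sizein in1 in2 (evaluate_binary sizeout sizein in1 in2)

-- ===== LEMMAS AND PROOFS =====

-- a & b ≤ b for nonnegative b (any a), from the case split in PySem.Int.band
theorem pv_band_le_right (a b : Int) (hb : 0 ≤ b) : PySem.Int.band a b ≤ b := by
  unfold PySem.Int.band
  by_cases ha : 0 ≤ a
  · simp only [ha, hb, if_true]
    calc ((a.toNat &&& b.toNat : Nat) : Int) ≤ (b.toNat : Int) := by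
          exact_mod_cast Nat.and_le_right
      _ = b := Int.toNat_of_nonneg hb
  · simp only [ha, hb, if_true, if_false]
    calc ((b.toNat - (b.toNat &&& (-a - 1).toNat) : Nat) : Int) ≤ (b.toNat : Int) := by
          exact_mod_cast Nat.sub_le _ _
      _ = b := Int.toNat_of_nonneg hb

theorem pv_band_nonneg_right (a b : Int) (hb : 0 ≤ b) : 0 ≤ PySem.Int.band a b := by
  unfold PySem.Int.band
  by_cases ha : 0 ≤ a
  · simp only [ha, hb, if_true]; exact Int.natCast_nonneg _
  · simp only [ha, hb, if_true, if_false]; exact Int.natCast_nonneg _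

-- a nonnegative value below 2^k has zero bit k: AND with 2^k vanishes
theorem pv_band_two_pow_eq_zero (x : Int) (k : Nat) (hx : 0 ≤ x)
    (hlt : x < (2 : Int) ^ k) : PySem.Int.band x ((2 : Int) ^ k) = 0 := by
  have hpk : (0 : Int) ≤ (2 : Int) ^ k := by positivity
  rw [PySem.Int.band_of_nonneg hx hpk]
  have h2 : ((2 : Int) ^ k).toNat = 2 ^ k := by
    rw [show ((2 : Int) ^ k) = ((2 ^ k : Nat) : Int) by push_cast; ring, Int.toNat_natCast]
  have hxk : x.toNat < 2 ^ k := by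
    have hcast : ((x.toNat : Int)) < (((2 : Nat) ^ k : Nat) : Int) := by
      rw [Int.toNat_of_nonneg hx]; push_cast; exact hlt
    exact_mod_cast hcast
  rw [h2, Nat.and_two_pow, Nat.testBit_lt_two_pow hxk]
  simp

-- the shifting loop: each step shifts by 8, so the whole fold shifts by 8·length
theorem pv_foldl_shift (l : List Int) (c : Int) :
    l.foldl (fun (b : Int) _ => b <<< (8 : Nat)) c = c <<< (8 * l.length) := by
  induction l generalizing c with
  | nil => simp
  | cons x xs ih =>
      rw [List.foldl_cons, ih]
      simp only [Int.shiftLeft_eq, List.length_cons]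
      rw [show 8 * (xs.length + 1) = 8 + 8 * xs.length from by ring, pow_add]
      ring

theorem pv_shiftLeft_int (a : Int) (n : Nat) : a <<< n = a * 2 ^ n := Int.shiftLeft_eq a n

-- ===== VERDICT (by name: the statement is the Claim_ definition above) =====
theorem evaluate_binary_spec : Claim_equal_evaluate_binary := by
  intro sizeout sizein in1 in2 _
  unfold Spec_evaluate_binary evaluate_binary evaluate_binary_alt
  by_cases hsz : sizein ≤ 0
  · simp [hsz]
  · simp only [hsz, if_false]
    set n : Nat := sizein.toNat with hn
    set mask : Int := ((1 : Int) <<< n) - 1 with hmask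
    have hmask2 : mask = (2 : Int) ^ n - 1 := by rw [hmask, pv_shiftLeft_int]; ring
    have hmnn : 0 ≤ mask := by
      rw [hmask2]; have : (1 : Int) ≤ (2 : Int) ^ n := one_le_pow₀ (by norm_num); omega
    set a : Int := PySem.Int.band in1 mask with hadef
    set b : Int := PySem.Int.band in2 mask with hbdef
    have ha0 : 0 ≤ a := pv_band_nonneg_right _ _ hmnn
    have hb0 : 0 ≤ b := pv_band_nonneg_right _ _ hmnn
    have hau : a < (2 : Int) ^ n := by
      have h1 := pv_band_le_right in1 mask hmnn
      rw [← hadef] at h1; omega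
    have hbu : b < (2 : Int) ^ n := by
      have h1 := pv_band_le_right in2 mask hmnn
      rw [← hbdef] at h1; omega
    by_cases heq : a = b
    · simp [heq]
    · simp only [heq, if_false]
      have hcomp : (if a < b then (1 : Int) else 0) = if a ≤ b then 1 else 0 := by
        rcases lt_trichotomy a b with h | h | h
        · simp [h, le_of_lt h]
        · exact absurd h heq
        · simp [not_lt_of_gt h, not_le_of_gt h]
      by_cases hsmall : sizein < 8
      · simp only [hsmall, if_true]; exact hcomp
      · simp only [hsmall, if_false]
        -- the tested bit sits above the mask: both band results are 0
        have hlen : (PySem.List.pyRange 0 (sizein - 1) 1).length = (sizein - 1).toNat := by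
          rw [PySem.List.length_pyRange_one]; norm_num
        set L : Nat := (sizein - 1).toNat with hL
        have hfold : (PySem.List.pyRange 0 (sizein - 1) 1).foldl
            (fun (b : Int) _ => b <<< (8 : Nat)) 128 = (2 : Int) ^ (8 * L + 7) := by
          rw [pv_foldl_shift, hlen, pv_shiftLeft_int, pow_add]
          norm_num [mul_comm]
        have hnL : n ≤ 8 * L + 7 := by omega
        have hpow : (2 : Int) ^ n ≤ (2 : Int) ^ (8 * L + 7) :=
          pow_le_pow_right₀ (by norm_num) hnL
        have hza : PySem.Int.band a ((2 : Int) ^ (8 * L + 7)) = 0 :=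
          pv_band_two_pow_eq_zero a _ ha0 (lt_of_lt_of_le hau hpow)
        have hzb : PySem.Int.band b ((2 : Int) ^ (8 * L + 7)) = 0 :=
          pv_band_two_pow_eq_zero b _ hb0 (lt_of_lt_of_le hbu hpow)
        simp only [hfold, hza, hzb]
        simpa using hcomp
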